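-- pv_equiv track=rewrite | github.com/4centto/SchoolWork | Compiladores/LosPochos_C-05/programa.py | getV
-- ===== SOURCE A (Python) =====
-- def getV(line, counter, numb):
--
--     #Agregamos nuestra primer V a la cadena, y actualizamos nuestra posicion mas 1
--     numb += line[counter]
--     counter += 1
--
--     #Validamos si nuestra posicion no excede de la longitud total de la cadena
--     #Validamos si en nuestra posicion encontramos al menos una I, ya que V solo puede tener I's despues
--     if counter < len(line) and line[counter] == "I":
--         aux = 0 #Almacena el numero de veces que encuentra una I
--
--         #Recorremos en 3, ya que solo podemos agregar maximo 3 I's despues de una V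
--         for i in range(3):
--             #Validamos si en nuestra posicion + i no exede la longitud total de la linea
--             if counter + i < len(line):
--                 #Validamos si nuestra posicion + i es igual a una I
--                 if line[counter + i] == "I":
--                     numb += line[counter + i] #Agregamos la I a nuestra cadena
--                     aux += 1 #Aumentamos en 1 nuestra variable
--
--         #Actualizamos nuestra posicion agregando el numero de veces que se añadio una I a la cadena
--         counter += aux
--
--     #Retornamos el valor de nuestra posicion actual, y de nuestra cadena
--     return counter, numb
-- ===== SOURCE B (Python) =====
-- def _takeI(window, counter, numb):
--     # Recursively consume the window: each 'I' is appended and advances the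
--     # position; any other char is skipped without advancing (A does not break).
--     if not window:
--         return counter, numb
--     head, rest = window[0], window[1:]
--     if head == "I":
--         return _takeI(rest, counter + 1, numb + "I")
--     return _takeI(rest, counter, numb)
--
--
-- def getV(line, counter, numb):
--     numb += line[counter]
--     counter += 1
--     if line[counter:counter + 1] == "I":
--         return _takeI(line[counter:counter + 3], counter, numb)
--     return counter, numb
-- ===== Notes on version B (the rewrite author's own statement) =====
-- stated objective: alternative
-- what changed: Replaces A's fixed 3-iteration index loop with nested bounds/equality conditionals by a recursive helper that structurally consumes the sliced 3-char window character by character, threading (counter, numb) as an accumulator with no index arithmetic.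
-- outside the precondition, e.g. on getV('IVI', -2, ''): A returns (1, 'VII'), B returns (-1, 'V'); on getV('VII', 5, ''): A raises IndexError, B raises IndexError
import Mathlib
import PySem

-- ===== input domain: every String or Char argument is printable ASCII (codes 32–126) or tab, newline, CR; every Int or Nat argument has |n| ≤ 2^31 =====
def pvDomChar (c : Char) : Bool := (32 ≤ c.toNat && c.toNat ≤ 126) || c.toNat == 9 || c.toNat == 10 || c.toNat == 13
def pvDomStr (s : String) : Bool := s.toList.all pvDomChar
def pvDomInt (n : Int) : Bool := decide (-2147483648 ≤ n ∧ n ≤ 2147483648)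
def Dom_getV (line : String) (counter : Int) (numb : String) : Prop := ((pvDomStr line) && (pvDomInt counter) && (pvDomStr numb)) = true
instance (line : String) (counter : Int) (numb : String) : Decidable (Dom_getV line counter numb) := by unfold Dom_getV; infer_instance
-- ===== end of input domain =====

-- Rewrite: B replaces A's fixed 3-iteration index loop (with nested bounds and equality
-- checks) by a recursive helper that structurally consumes the sliced 3-char window,
-- threading (counter, numb) as an accumulator with no index arithmetic.


-- ===== PORT A =====
def getV (line : String) (counter : Int) (numb : String) : Int × String :=
  let cs := line.toList
  -- numb += line[counter]; counter += 1  (line[counter] in range by Pre_)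
  let nb1 := numb.toList ++ [PySem.List.pyGetD cs counter ' ']
  let c1 := counter + 1
  if c1 < (cs.length : Int) ∧ PySem.List.pyGetD cs c1 ' ' = 'I' then
    let st := (PySem.List.pyRange 0 3 1).foldl
      (fun (s : List Char × Int) i =>
        if c1 + i < (cs.length : Int) then
          if PySem.List.pyGetD cs (c1 + i) ' ' = 'I' then
            (s.1 ++ [PySem.List.pyGetD cs (c1 + i) ' '], s.2 + 1)
          else s
        else s) (nb1, 0)
    (c1 + st.2, String.ofList st.1)
  else (c1, String.ofList nb1)

-- ===== PORT B =====
-- _takeI: recursive consumption of the window; 'I' advances and appends, others are skipped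
def pvTakeI : List Char → Int → List Char → Int × String
  | [], c, nb => (c, String.ofList nb)
  | h :: rest, c, nb =>
      if h = 'I' then pvTakeI rest (c + 1) (nb ++ ['I']) else pvTakeI rest c nb

def getV_alt (line : String) (counter : Int) (numb : String) : Int × String :=
  let cs := line.toList
  let nb1 := numb.toList ++ [PySem.List.pyGetD cs counter ' ']
  let c1 := counter + 1
  if PySem.List.slice cs (some c1) (some (c1 + 1)) = ['I'] then
    pvTakeI (PySem.List.slice cs (some c1) (some (c1 + 3))) c1 nb1
  else (c1, String.ofList nb1)

-- ===== PRECONDITION & SPEC =====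
-- Pre_ restricts to the parser's natural domain 0 ≤ counter < len(line): counter ≥ len(line)
-- makes A raise IndexError, and negative counter is outside the natural domain (A's
-- negative-index wraparound there is accidental).
def Pre_getV (line : String) (counter : Int) (numb : String) : Prop :=
  0 ≤ counter ∧ counter < (line.toList.length : Int)
instance (line : String) (counter : Int) (numb : String) : Decidable (Pre_getV line counter numb) := by unfold Pre_getV; infer_instance
def pvWitness_getV : String × Int × String := ("XVIIX", 1, "X")

def Spec_getV (line : String) (counter : Int) (numb : String) (out : Int × String) : Prop := out = getV_alt line counter numb
instance (line : String) (counter : Int) (numb : String) (out : Int × String) : Decidable (Spec_getV line counter numb out) := by unfold Spec_getV; infer_instance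

-- ===== CLAIM (what is proved, stated in full; the proofs are below) =====
def Claim_equal_getV : Prop := ∀ (line : String) (counter : Int) (numb : String), Dom_getV line counter numb → Pre_getV line counter numb → Spec_getV line counter numb (getV line counter numb)

-- ===== LEMMAS AND PROOFS =====

theorem getV_core (l : List Char) (k : Nat) (nb : List Char) (hk : k < l.length) :
    getV (String.ofList l) (k : Int) (String.ofList nb) = getV_alt (String.ofList l) (k : Int) (String.ofList nb) := by
  unfold getV getV_alt
  simp only [String.toList_ofList]
  have hr : PySem.List.pyRange 0 3 1 = [0,1,2] := by decide
  have ec : (k:Int) + 1 = ((k+1:Nat):Int) := by push_cast; ring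
  have eA : ((k+1:Nat):Int) + 1 = ((k+1:Nat):Int) + ((1:Nat):Int) := by norm_num
  have e3 : ((k+1:Nat):Int) + 3 = ((k+1:Nat):Int) + ((3:Nat):Int) := by norm_num
  have e1 : ((k+1:Nat):Int) + 1 = ((k+2:Nat):Int) := by push_cast; ring
  have e2 : ((k+1:Nat):Int) + 2 = ((k+3:Nat):Int) := by push_cast; ring
  rw [hr, ec, eA, e3, PySem.List.slice_natCast_add, PySem.List.slice_natCast_add]
  simp only [List.foldl, add_zero, e1, e2, PySem.List.pyGetD_natCast, Nat.cast_lt]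
  obtain ⟨d, hd⟩ : ∃ d, l.drop (k+1) = d := ⟨_, rfl⟩
  have hlen : l.length = k + 1 + d.length := by
    have h2 := List.length_drop (l := l) (i := k+1)
    rw [hd] at h2; omega
  have g0 : l.getD (k+1) ' ' = d.getD 0 ' ' := by
    rw [← hd, List.getD_eq_getElem?_getD, List.getD_eq_getElem?_getD, List.getElem?_drop]
  have g1 : l.getD (k+2) ' ' = d.getD 1 ' ' := by
    rw [← hd, List.getD_eq_getElem?_getD, List.getD_eq_getElem?_getD, List.getElem?_drop]
  have g2 : l.getD (k+3) ' ' = d.getD 2 ' ' := by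
    rw [← hd, List.getD_eq_getElem?_getD, List.getD_eq_getElem?_getD, List.getElem?_drop]
  rw [hd, g0, g1, g2]
  match d with
  | [] =>
    simp only [List.length_nil] at hlen
    simp [hlen, List.getD]
  | [c0] =>
    simp only [List.length_cons, List.length_nil] at hlen
    have h1 : k + 1 < l.length := by omega
    have h2 : ¬ (k + 2 < l.length) := by omega
    have h3 : ¬ (k + 3 < l.length) := by omega
    by_cases hc0 : c0 = 'I'
    · subst hc0; simp [h1, h2, h3, pvTakeI, List.getD]
    · simp [h1, hc0, List.getD]
  | [c0, c1] =>
    simp only [List.length_cons, List.length_nil] at hlen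
    have h1 : k + 1 < l.length := by omega
    have h2 : k + 2 < l.length := by omega
    have h3 : ¬ (k + 3 < l.length) := by omega
    by_cases hc0 : c0 = 'I'
    · subst hc0
      by_cases hc1 : c1 = 'I'
      · subst hc1; simp [h1, h2, h3, pvTakeI, List.getD]; ring
      · simp [h1, h2, h3, hc1, pvTakeI, List.getD]
    · simp [h1, hc0, List.getD]
  | c0 :: c1 :: c2 :: rest =>
    simp only [List.length_cons] at hlen
    have h1 : k + 1 < l.length := by omega
    have h2 : k + 2 < l.length := by omega
    have h3 : k + 3 < l.length := by omega
    by_cases hc0 : c0 = 'I'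
    · subst hc0
      by_cases hc1 : c1 = 'I'
      · subst hc1
        by_cases hc2 : c2 = 'I'
        · subst hc2; simp [h1, h2, h3, pvTakeI, List.getD]; ring
        · simp [h1, h2, h3, hc2, pvTakeI, List.getD]; ring
      · by_cases hc2 : c2 = 'I'
        · subst hc2; simp [h1, h2, h3, hc1, pvTakeI, List.getD]; ring
        · simp [h1, h2, h3, hc1, hc2, pvTakeI, List.getD]
    · simp [h1, hc0, List.getD]

-- ===== VERDICT (by name: the statement is the Claim_ definition above) =====
theorem getV_spec : Claim_equal_getV := by
  intro line counter numb _ hpre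
  obtain ⟨h0, hlt⟩ := hpre
  unfold Spec_getV
  obtain ⟨k, rfl⟩ : ∃ k : Nat, counter = (k : Int) := ⟨counter.toNat, (Int.toNat_of_nonneg h0).symm⟩
  have hk : k < line.toList.length := by exact_mod_cast hlt
  have := getV_core line.toList k numb.toList hk
  simpa only [String.ofList_toList] using this
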